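-- pv_equiv track=rewrite | github.com/rsalesc/rbx | rbx/box/validators.py | _process_bounds
-- ===== SOURCE A (Python) =====
-- from typing import Dict, Iterable, List, Optional, Set, Tuple
--
-- HitBounds = Dict[str, Tuple[bool, bool]]
--
-- def _bounds_or(lhs: Tuple[bool, bool], rhs: Tuple[bool, bool]) -> Tuple[bool, bool]:
--     return (lhs[0] or rhs[0], lhs[1] or rhs[1])
--
-- def _process_bounds(log: str) -> HitBounds:
--     bounds: HitBounds = {}
--     for line in log.splitlines():
--         items = line.split(':')
--         if len(items) != 2:
--             continue
--         k, v = items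
--         v = v.strip()
--
--         if 'constant-bounds' in k:
--             continue
--
--         hit = ('min-value-hit' in v, 'max-value-hit' in v)
--         if k not in bounds:
--             bounds[k] = hit
--             continue
--         bounds[k] = _bounds_or(bounds[k], hit)
--     return bounds
-- ===== SOURCE B (Python) =====
-- def _process_bounds(log):
--     groups = {}
--     for line in log.splitlines():
--         items = line.split(':')
--         if len(items) != 2:
--             continue
--         k, v = items
--         v = v.strip()
--         if 'constant-bounds' in k:
--             continue
--         groups.setdefault(k, []).append(('min-value-hit' in v, 'max-value-hit' in v))
--     return {k: (any(m for m, _ in hits), any(x for _, x in hits))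
--             for k, hits in groups.items()}
-- ===== Notes on version B (the rewrite author's own statement) =====
-- stated objective: alternative
-- what changed: Replaces A's single-pass in-place OR fold over the dict with a two-phase decomposition: first group each line's (min-hit, max-hit) tuple into a dict of per-key lists (first-appearance order), then reduce each group with any() over each component.
import Mathlib
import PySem

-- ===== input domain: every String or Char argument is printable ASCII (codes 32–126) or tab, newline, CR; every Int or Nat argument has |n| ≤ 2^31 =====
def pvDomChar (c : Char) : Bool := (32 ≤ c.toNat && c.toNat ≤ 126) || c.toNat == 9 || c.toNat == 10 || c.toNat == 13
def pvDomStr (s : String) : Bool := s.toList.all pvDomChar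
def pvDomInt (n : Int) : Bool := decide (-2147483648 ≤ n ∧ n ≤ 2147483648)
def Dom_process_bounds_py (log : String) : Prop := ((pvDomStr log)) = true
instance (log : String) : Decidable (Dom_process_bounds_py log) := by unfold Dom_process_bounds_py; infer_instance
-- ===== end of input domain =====

-- B replaces A's in-place OR fold with a two-pass group-by-key table then an any()-reduction; return values proved equal (alternative decomposition, same cost).


-- ===== PORT A =====
-- _bounds_or
def boundsOr (lhs rhs : Bool × Bool) : Bool × Bool := (lhs.1 || rhs.1, lhs.2 || rhs.2)

-- one iteration of A's loop: split on ':', require exactly 2 items, strip v, skip 'constant-bounds' keys, then OR into the dict in place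
def pbStepA (d : PySem.Dict String (Bool × Bool)) (line : String) : PySem.Dict String (Bool × Bool) :=
  match PySem.Str.split? line ":" with
  | some [k, v0] =>
    let v := PySem.Str.strip v0
    if PySem.Str.isIn "constant-bounds" k then d
    else
      let hit := (PySem.Str.isIn "min-value-hit" v, PySem.Str.isIn "max-value-hit" v)
      match d.get? k with
      | none => d.insert k hit
      | some old => d.insert k (boundsOr old hit)
  | _ => d

def process_bounds_py (log : String) : List (String × Bool × Bool) :=
  ((PySem.Str.splitlines log).foldl pbStepA PySem.Dict.empty).items

-- ===== PORT B =====
-- one iteration of B's first pass: same filters, but only append the line's hit tuple to groups[k]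
def pbStepB (g : PySem.Dict String (List (Bool × Bool))) (line : String) :
    PySem.Dict String (List (Bool × Bool)) :=
  match PySem.Str.split? line ":" with
  | some [k, v0] =>
    let v := PySem.Str.strip v0
    if PySem.Str.isIn "constant-bounds" k then g
    else
      g.modify k [] (· ++ [(PySem.Str.isIn "min-value-hit" v, PySem.Str.isIn "max-value-hit" v)])
  | _ => g

def process_bounds_py_alt (log : String) : List (String × Bool × Bool) :=
  ((PySem.Str.splitlines log).foldl pbStepB PySem.Dict.empty).items.map
    (fun p => (p.1, (p.2.any (·.1), p.2.any (·.2))))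

-- ===== PRECONDITION & SPEC =====
def Spec_process_bounds_py (log : String) (out : List (String × Bool × Bool)) : Prop := out = process_bounds_py_alt log
instance (log : String) (out : List (String × Bool × Bool)) : Decidable (Spec_process_bounds_py log out) := by unfold Spec_process_bounds_py; infer_instance

-- ===== CLAIM (what is proved, stated in full; the proofs are below) =====
def Claim_equal_process_bounds_py : Prop := ∀ (log : String), Dom_process_bounds_py log → Spec_process_bounds_py log (process_bounds_py log)

-- ===== LEMMAS AND PROOFS =====
-- the (key, hit) pair a line contributes, if it passes the filters (shared characterisation of both loops)
def pbPair? (line : String) : Option (String × Bool × Bool) :=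
  match PySem.Str.split? line ":" with
  | some [k, v0] =>
    let v := PySem.Str.strip v0
    if PySem.Str.isIn "constant-bounds" k then none
    else some (k, PySem.Str.isIn "min-value-hit" v, PySem.Str.isIn "max-value-hit" v)
  | _ => none

theorem pbStepA_eq (d : PySem.Dict String (Bool × Bool)) (line : String) :
    pbStepA d line = match pbPair? line with
      | none => d
      | some p => d.insert p.1 (boundsOr (d.getD p.1 (false, false)) p.2) := by
  unfold pbStepA pbPair?
  rcases h : PySem.Str.split? line ":" with _ | ⟨_ | ⟨k, _ | ⟨v0, _ | _⟩⟩⟩ <;> simp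
  split_ifs with hc
  · rfl
  · rcases hg : d.get? k with _ | old <;> simp
    · rw [PySem.Dict.getD_of_get?_eq_none d _ hg]
      simp [boundsOr]
    · rw [PySem.Dict.getD_of_get?_eq_some d _ hg]

theorem pbStepB_eq (g : PySem.Dict String (List (Bool × Bool))) (line : String) :
    pbStepB g line = match pbPair? line with
      | none => g
      | some p => g.modify p.1 [] (· ++ [p.2]) := by
  unfold pbStepB pbPair?
  rcases h : PySem.Str.split? line ":" with _ | ⟨_ | ⟨k, _ | ⟨v0, _ | _⟩⟩⟩ <;> simp
  split_ifs with hc <;> rfl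

theorem foldl_filterMap {α β σ : Type} (f? : α → Option β) (g : σ → β → σ) (l : List α) (s : σ) :
    l.foldl (fun s a => match f? a with | none => s | some b => g s b) s
      = (l.filterMap f?).foldl g s := by
  induction l generalizing s with
  | nil => rfl
  | cons a t ih => cases h : f? a <;> simp [h, ih]

theorem getD_foldl_insert_or (l : List (String × Bool × Bool)) (d : PySem.Dict String (Bool × Bool))
    (c : String) :
    (l.foldl (fun d p => d.insert p.1 (boundsOr (d.getD p.1 (false, false)) p.2)) d).getD c (false, false)
      = ((l.filter (fun p => p.1 == c)).map (fun p => p.2)).foldl boundsOr (d.getD c (false, false)) := by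
  induction l generalizing d with
  | nil => rfl
  | cons p t ih =>
    simp only [List.foldl_cons, ih, List.filter_cons]
    by_cases hc : p.1 = c
    · simp [hc]
    · simp [hc, PySem.Dict.getD_insert, Ne.symm hc]

theorem foldl_boundsOr (hs : List (Bool × Bool)) (a : Bool × Bool) :
    hs.foldl boundsOr a = (a.1 || hs.any (fun p => p.1), a.2 || hs.any (fun p => p.2)) := by
  induction hs generalizing a with
  | nil => simp
  | cons h t ih => simp [ih, boundsOr, Bool.or_assoc]

theorem process_bounds_py_eq_alt (log : String) :
    process_bounds_py log = process_bounds_py_alt log := by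
  unfold process_bounds_py process_bounds_py_alt
  have hA : (PySem.Str.splitlines log).foldl pbStepA PySem.Dict.empty
      = ((PySem.Str.splitlines log).filterMap pbPair?).foldl
          (fun d p => d.insert p.1 (boundsOr (d.getD p.1 (false, false)) p.2)) PySem.Dict.empty := by
    rw [← foldl_filterMap]
    congr 1; funext d line; rw [pbStepA_eq]; cases pbPair? line <;> rfl
  have hB : (PySem.Str.splitlines log).foldl pbStepB PySem.Dict.empty
      = ((PySem.Str.splitlines log).filterMap pbPair?).foldl
          (fun g p => g.modify p.1 [] (· ++ [p.2])) PySem.Dict.empty := by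
    rw [← foldl_filterMap]
    congr 1; funext g line; rw [pbStepB_eq]; cases pbPair? line <;> rfl
  rw [hA, hB]
  set pairs := (PySem.Str.splitlines log).filterMap pbPair? with hpairs
  set dA := pairs.foldl (fun d p => d.insert p.1 (boundsOr (d.getD p.1 (false, false)) p.2))
      PySem.Dict.empty with hdA
  set dB := pairs.foldl (fun g p => g.modify p.1 [] (· ++ [p.2])) PySem.Dict.empty with hdB
  have hkA : dA.keys = PySem.Set.update [] (pairs.map (fun p => p.1)) := by
    rw [hdA, PySem.Dict.keys_foldl_insert_key pairs (fun p => p.1)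
      (fun d p => boundsOr (d.getD p.1 (false, false)) p.2), PySem.Dict.keys_empty]
  have hkB : dB.keys = PySem.Set.update [] (pairs.map (fun p => p.1)) := by
    rw [hdB, PySem.Dict.keys_foldl_modify_key pairs (fun p => p.1) []
      (fun _ p old => old ++ [p.2]), PySem.Dict.keys_empty]
  have hnA : dA.keys.Nodup := by
    rw [hdA]
    exact PySem.Dict.nodup_keys_foldl_insert_key pairs (fun p => p.1) _ _ PySem.Dict.nodup_keys_empty
  have hnB : dB.keys.Nodup := by
    rw [hdB]
    exact PySem.Dict.nodup_keys_foldl_modify_key pairs (fun p => p.1) [] _ _ PySem.Dict.nodup_keys_empty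
  rw [PySem.Dict.items_eq_map_keys dA hnA (false, false),
      PySem.Dict.items_eq_map_keys dB hnB [], List.map_map, hkA, hkB]
  refine List.map_congr_left (fun k _ => ?_)
  have hgA : dA.getD k (false, false)
      = ((pairs.filter (fun p => p.1 == k)).map (fun p => p.2)).foldl boundsOr (false, false) := by
    rw [hdA, getD_foldl_insert_or, PySem.Dict.getD_empty]
  have hgB : dB.getD k [] = (pairs.filter (fun p => p.1 == k)).map (fun p => p.2) := by
    rw [hdB, PySem.Dict.getD_foldl_modify_append]; simp
  simp [Function.comp, hgA, hgB, foldl_boundsOr]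

-- ===== VERDICT (by name: the statement is the Claim_ definition above) =====
theorem process_bounds_py_spec : Claim_equal_process_bounds_py := by
  intro log _
  unfold Spec_process_bounds_py
  exact process_bounds_py_eq_alt log
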